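-- pv_equiv track=rewrite | github.com/redhat-ai-tools/tekton-assistant | ingester.py | infer_error_type
-- ===== SOURCE A (Python) =====
-- def infer_error_type(error: str) -> str:
--     """Categorize error types based on error message patterns."""
--     error_lower = error.lower()
--
--     # OOM and resource issues
--     if any(keyword in error_lower for keyword in ["oom", "exit code 137", "memory"]):
--         return "OOM"
--     # Registry and image issues
--     elif any(keyword in error_lower for keyword in ["registry", "push", "pull", "image"]):
--         return "Registry_Push_Failure"
--     # Build failures
--     elif any(keyword in error_lower for keyword in ["build", "compile", "make"]):
--         return "Build_Failure"
--     # Version compatibility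
--     elif any(keyword in error_lower for keyword in ["version", "compatibility", "requires"]):
--         return "Version_Compatibility"
--     # Permission issues
--     elif any(keyword in error_lower for keyword in ["permission", "denied", "unauthorized"]):
--         return "Permission_Denied"
--     # Network and connectivity
--     elif any(keyword in error_lower for keyword in ["network", "timeout", "connection"]):
--         return "Network_Issue"
--     # Missing files/resources
--     elif any(keyword in error_lower for keyword in ["missing", "not found", "no such file"]):
--         return "Missing_Files"
--
--     return "Other"
-- ===== SOURCE B (Python) =====
-- # Flat keyword->priority index scanned once with a min-accumulator (no elif
-- # cascade, no per-category any(), no early return); the answer is the label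
-- # at the smallest matched priority.
-- _KEYWORD_PRIORITY = {
--     "oom": 0, "exit code 137": 0, "memory": 0,
--     "registry": 1, "push": 1, "pull": 1, "image": 1,
--     "build": 2, "compile": 2, "make": 2,
--     "version": 3, "compatibility": 3, "requires": 3,
--     "permission": 4, "denied": 4, "unauthorized": 4,
--     "network": 5, "timeout": 5, "connection": 5,
--     "missing": 6, "not found": 6, "no such file": 6,
-- }
--
-- _LABELS = ["OOM", "Registry_Push_Failure", "Build_Failure",
--            "Version_Compatibility", "Permission_Denied", "Network_Issue",
--            "Missing_Files", "Other"]
--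
-- def infer_error_type(error: str) -> str:
--     """Categorize error types based on error message patterns."""
--     error_lower = error.lower()
--     best = 7
--     for keyword, priority in _KEYWORD_PRIORITY.items():
--         if priority < best and keyword in error_lower:
--             best = priority
--     return _LABELS[best]
-- ===== Notes on version B (the rewrite author's own statement) =====
-- stated objective: alternative
-- what changed: Replaced the seven-branch elif cascade of per-category any() tests with a single full scan over a flat keyword-to-priority index keeping the minimum matched priority, then one indexed lookup into a label table.
import Mathlib
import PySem

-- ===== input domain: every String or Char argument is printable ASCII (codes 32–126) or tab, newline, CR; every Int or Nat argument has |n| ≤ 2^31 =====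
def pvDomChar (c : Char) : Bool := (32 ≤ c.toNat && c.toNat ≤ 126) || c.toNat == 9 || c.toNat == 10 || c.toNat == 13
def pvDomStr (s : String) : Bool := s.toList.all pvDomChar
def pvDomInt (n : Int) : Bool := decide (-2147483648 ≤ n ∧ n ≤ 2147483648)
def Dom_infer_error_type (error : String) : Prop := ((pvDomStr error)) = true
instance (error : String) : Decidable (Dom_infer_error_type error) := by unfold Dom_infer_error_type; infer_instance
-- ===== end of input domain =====

-- B replaces A's elif cascade of per-category any() tests with one full scan over a
-- flat keyword→priority index keeping the minimum matched priority (alternative; same cost).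

-- ===== PORT A =====
def infer_error_type (error : String) : String :=
  let error_lower := PySem.Str.lower error
  if ["oom", "exit code 137", "memory"].any (fun k => PySem.Str.isIn k error_lower) then
    "OOM"
  else if ["registry", "push", "pull", "image"].any (fun k => PySem.Str.isIn k error_lower) then
    "Registry_Push_Failure"
  else if ["build", "compile", "make"].any (fun k => PySem.Str.isIn k error_lower) then
    "Build_Failure"
  else if ["version", "compatibility", "requires"].any (fun k => PySem.Str.isIn k error_lower) then
    "Version_Compatibility"
  else if ["permission", "denied", "unauthorized"].any (fun k => PySem.Str.isIn k error_lower) then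
    "Permission_Denied"
  else if ["network", "timeout", "connection"].any (fun k => PySem.Str.isIn k error_lower) then
    "Network_Issue"
  else if ["missing", "not found", "no such file"].any (fun k => PySem.Str.isIn k error_lower) then
    "Missing_Files"
  else
    "Other"

-- ===== PORT B =====
def pvKeywordPriority : List (String × Nat) :=
  [("oom", 0), ("exit code 137", 0), ("memory", 0),
   ("registry", 1), ("push", 1), ("pull", 1), ("image", 1),
   ("build", 2), ("compile", 2), ("make", 2),
   ("version", 3), ("compatibility", 3), ("requires", 3),
   ("permission", 4), ("denied", 4), ("unauthorized", 4),
   ("network", 5), ("timeout", 5), ("connection", 5),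
   ("missing", 6), ("not found", 6), ("no such file", 6)]

def pvLabels : List String :=
  ["OOM", "Registry_Push_Failure", "Build_Failure", "Version_Compatibility",
   "Permission_Denied", "Network_Issue", "Missing_Files", "Other"]

def infer_error_type_alt (error : String) : String :=
  let error_lower := PySem.Str.lower error
  let best := pvKeywordPriority.foldl
    (fun best p => if p.2 < best && PySem.Str.isIn p.1 error_lower then p.2 else best) 7
  pvLabels.getD best "Other"

-- ===== PRECONDITION & SPEC =====
def Spec_infer_error_type (error : String) (out : String) : Prop := out = infer_error_type_alt error
instance (error : String) (out : String) : Decidable (Spec_infer_error_type error out) := by unfold Spec_infer_error_type; infer_instance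

-- ===== CLAIM (what is proved, stated in full; the proofs are below) =====
def Claim_equal_infer_error_type : Prop := ∀ (error : String), Dom_infer_error_type error → Spec_infer_error_type error (infer_error_type error)

-- ===== LEMMAS AND PROOFS =====

-- once the accumulator is ≤ every remaining priority, the min-fold is constant
theorem pv_tail_const (el : String) (l : List (String × Nat)) (a : Nat)
    (h : ∀ p ∈ l, a ≤ p.2) :
    l.foldl (fun best p => if p.2 < best && PySem.Str.isIn p.1 el then p.2 else best) a = a := by
  induction l with
  | nil => rfl
  | cons p l ih =>
    have hp : ¬ p.2 < a := not_lt.2 (h p (by simp))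
    simp only [List.foldl_cons, hp, decide_false, Bool.false_and]
    exact ih (fun q hq => h q (List.mem_cons_of_mem _ hq))

-- one priority group: if any keyword of the group matches, the fold finishes at i;
-- otherwise it continues over the rest with the accumulator unchanged
theorem pv_group (el : String) (i : Nat) (kws : List String) (rest : List (String × Nat)) (a : Nat)
    (hia : i < a) (hrest : ∀ p ∈ rest, i ≤ p.2) :
    ((kws.map (fun k => (k, i))) ++ rest).foldl
        (fun best p => if p.2 < best && PySem.Str.isIn p.1 el then p.2 else best) a
      = if kws.any (fun k => PySem.Str.isIn k el) then i
        else rest.foldl (fun best p => if p.2 < best && PySem.Str.isIn p.1 el then p.2 else best) a := by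
  induction kws with
  | nil => simp
  | cons k kws ih =>
    simp only [List.map_cons, List.cons_append, List.foldl_cons, List.any_cons]
    by_cases hc : PySem.Str.isIn k el = true
    · simp only [hc, hia, decide_true, Bool.and_true, if_true, Bool.true_or, if_true]
      exact pv_tail_const el _ i (by
        intro q hq
        rcases List.mem_append.1 hq with hq | hq
        · rcases List.mem_map.1 hq with ⟨x, _, rfl⟩; exact le_refl i
        · exact hrest q hq)
    · simp only [hc, Bool.and_false, Bool.false_or]
      exact ih

theorem pv_fold_eq (el : String) :
    pvKeywordPriority.foldl
        (fun best p => if p.2 < best && PySem.Str.isIn p.1 el then p.2 else best) 7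
      = if ["oom", "exit code 137", "memory"].any (fun k => PySem.Str.isIn k el) then 0
        else if ["registry", "push", "pull", "image"].any (fun k => PySem.Str.isIn k el) then 1
        else if ["build", "compile", "make"].any (fun k => PySem.Str.isIn k el) then 2
        else if ["version", "compatibility", "requires"].any (fun k => PySem.Str.isIn k el) then 3
        else if ["permission", "denied", "unauthorized"].any (fun k => PySem.Str.isIn k el) then 4
        else if ["network", "timeout", "connection"].any (fun k => PySem.Str.isIn k el) then 5
        else if ["missing", "not found", "no such file"].any (fun k => PySem.Str.isIn k el) then 6
        else 7 := by
  rw [show pvKeywordPriority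
      = (["oom", "exit code 137", "memory"].map (fun k => (k, 0))) ++
        ((["registry", "push", "pull", "image"].map (fun k => (k, 1))) ++
        ((["build", "compile", "make"].map (fun k => (k, 2))) ++
        ((["version", "compatibility", "requires"].map (fun k => (k, 3))) ++
        ((["permission", "denied", "unauthorized"].map (fun k => (k, 4))) ++
        ((["network", "timeout", "connection"].map (fun k => (k, 5))) ++
        ((["missing", "not found", "no such file"].map (fun k => (k, 6))) ++ ([] : List (String × Nat)))))))) from rfl]
  rw [pv_group el 0 _ _ 7 (by norm_num) (by decide)]
  rw [pv_group el 1 _ _ 7 (by norm_num) (by decide)]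
  rw [pv_group el 2 _ _ 7 (by norm_num) (by decide)]
  rw [pv_group el 3 _ _ 7 (by norm_num) (by decide)]
  rw [pv_group el 4 _ _ 7 (by norm_num) (by decide)]
  rw [pv_group el 5 _ _ 7 (by norm_num) (by decide)]
  rw [pv_group el 6 _ _ 7 (by norm_num) (by decide)]
  simp

-- ===== VERDICT (by name: the statement is the Claim_ definition above) =====
theorem infer_error_type_spec : Claim_equal_infer_error_type := by
  intro error _
  unfold Spec_infer_error_type
  simp only [infer_error_type, infer_error_type_alt]
  rw [pv_fold_eq (PySem.Str.lower error)]
  split_ifs <;> rfl
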